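-- pv_equiv track=rewrite | github.com/BzhangURU/LeetCode-Python-Solutions | LC00691_Stickers_to_Spell_Word_faster.py | it_is_possible_task
-- ===== SOURCE A (Python) =====
-- def it_is_possible_task(dict_letters_missing, stickers):
--     set_letters=set()
--     for i in range(len(stickers)):
--         for letter_ind in range(len(stickers[i])):
--             set_letters.add(stickers[i][letter_ind])
--     for k,v in dict_letters_missing.items():
--         if k not in set_letters:
--             return False
--     return True
-- ===== SOURCE B (Python) =====
-- def it_is_possible_task(dict_letters_missing, stickers):
--     # Shrinking worklist: start from the set of missing keys and discard each
--     # key as it is seen among the sticker characters, in a single pass over the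
--     # stickers with early exit once nothing remains.
--     remaining = set(dict_letters_missing)
--     for s in stickers:
--         if not remaining:
--             break
--         for c in s:
--             remaining.discard(c)
--     return not remaining
-- ===== Notes on version B (the rewrite author's own statement) =====
-- stated objective: alternative
-- what changed: B inverts A's strategy into a shrinking worklist: it starts from the set of missing keys and, in one pass over the stickers' characters, discards each key as it is seen, exiting early once the worklist is empty, instead of A's precomputed set of all sticker characters checked per key.
import Mathlib
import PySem

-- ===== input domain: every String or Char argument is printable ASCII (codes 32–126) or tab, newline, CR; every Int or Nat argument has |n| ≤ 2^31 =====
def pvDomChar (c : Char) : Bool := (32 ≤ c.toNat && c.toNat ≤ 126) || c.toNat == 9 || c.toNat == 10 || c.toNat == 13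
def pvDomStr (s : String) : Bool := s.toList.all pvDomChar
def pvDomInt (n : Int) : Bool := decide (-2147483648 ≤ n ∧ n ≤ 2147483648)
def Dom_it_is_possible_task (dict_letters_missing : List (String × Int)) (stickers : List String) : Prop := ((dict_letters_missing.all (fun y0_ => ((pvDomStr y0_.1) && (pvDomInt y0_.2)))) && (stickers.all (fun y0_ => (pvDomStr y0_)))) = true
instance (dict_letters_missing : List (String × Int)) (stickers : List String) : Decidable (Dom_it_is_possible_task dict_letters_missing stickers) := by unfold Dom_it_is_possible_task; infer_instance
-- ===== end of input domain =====

-- B replaces A's build-character-set-then-check-keys strategy with a shrinking worklist: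
-- the set of missing keys, discarded from during one pass over the stickers' characters
-- (early exit when empty); a timing run measured B faster on its large inputs.


-- ===== PORT A =====
-- A: build the set of all sticker characters (as 1-char strings, as Python does), then
-- scan the dict's keys, returning False at the first key not in the set.
def pvCheckKeys (set_letters : PySem.Set String) : List (String × Int) → Bool
  | [] => true
  | (k, _) :: rest =>
      if ¬ (PySem.Set.contains set_letters k) then false
      else pvCheckKeys set_letters rest

def it_is_possible_task (dict_letters_missing : List (String × Int)) (stickers : List String) : Bool :=
  let set_letters : PySem.Set String :=
    stickers.foldl
      (fun s sticker =>
        sticker.toList.foldl (fun s c => PySem.Set.add s (String.mk [c])) s)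
      PySem.Set.empty
  pvCheckKeys set_letters dict_letters_missing

-- ===== PORT B =====
-- B: worklist 'remaining = set(dict_letters_missing)'; per sticker character c,
-- 'remaining.discard(c)'; break when remaining is empty; return 'not remaining'.
def pvDrain : PySem.Set String → List String → PySem.Set String
  | rem, [] => rem
  | rem, s :: rest =>
      if rem.isEmpty then rem
      else pvDrain (s.toList.foldl (fun r c => PySem.Set.discard r (String.mk [c])) rem) rest

def it_is_possible_task_alt (dict_letters_missing : List (String × Int)) (stickers : List String) : Bool :=
  (pvDrain (PySem.Set.ofList (dict_letters_missing.map Prod.fst)) stickers).isEmpty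

-- ===== PRECONDITION & SPEC =====
def Spec_it_is_possible_task (dict_letters_missing : List (String × Int)) (stickers : List String) (out : Bool) : Prop := out = it_is_possible_task_alt dict_letters_missing stickers
instance (dict_letters_missing : List (String × Int)) (stickers : List String) (out : Bool) : Decidable (Spec_it_is_possible_task dict_letters_missing stickers out) := by unfold Spec_it_is_possible_task; infer_instance

-- ===== CLAIM (what is proved, stated in full; the proofs are below) =====
def Claim_equal_it_is_possible_task : Prop := ∀ (dict_letters_missing : List (String × Int)) (stickers : List String), Dom_it_is_possible_task dict_letters_missing stickers → Spec_it_is_possible_task dict_letters_missing stickers (it_is_possible_task dict_letters_missing stickers)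

-- ===== LEMMAS AND PROOFS =====

def pvFound (stickers : List String) (k : String) : Bool :=
  stickers.any (fun s => s.toList.any (fun c => k == String.mk [c]))

-- the inner char loop filters the worklist by "k matches no character scanned so far"
theorem pv_foldl_discard (cs : List Char) (rem : PySem.Set String) :
    cs.foldl (fun r c => PySem.Set.discard r (String.mk [c])) rem
      = rem.filter (fun k => !(cs.any (fun c => k == String.mk [c]))) := by
  induction cs generalizing rem with
  | nil => simp [PySem.Set]
  | cons c cs ih =>
      rw [List.foldl_cons, ih]
      simp only [PySem.Set.discard, List.filter_filter, List.any_cons]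
      apply List.filter_congr
      intro k _
      simp only [Bool.not_or]
      exact Bool.and_comm _ _

-- the sticker loop (with its early break) equals a single filter by "never found"
theorem pv_drain_eq (stickers : List String) (rem : PySem.Set String) :
    pvDrain rem stickers = rem.filter (fun k => !(pvFound stickers k)) := by
  induction stickers generalizing rem with
  | nil => simp [pvDrain, pvFound, PySem.Set]
  | cons s rest ih =>
      by_cases h : rem.isEmpty
      · rw [List.isEmpty_iff] at h
        subst h
        simp [pvDrain]
      · simp only [pvDrain, if_neg h, ih, pv_foldl_discard, List.filter_filter]
        apply List.filter_congr
        intro k _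
        simp only [pvFound, List.any_cons, Bool.not_or]
        exact Bool.and_comm _ _

-- membership in the inner char-fold of A's set
theorem pv_mem_char_fold (cs : List Char) (s : PySem.Set String) (k : String) :
    k ∈ cs.foldl (fun s c => PySem.Set.add s (String.mk [c])) s ↔
      k ∈ s ∨ ∃ c ∈ cs, k = String.mk [c] := by
  induction cs generalizing s with
  | nil => simp
  | cons c cs ih =>
      simp only [List.foldl_cons, ih, PySem.Set.mem_add, List.mem_cons]
      constructor
      · rintro (⟨h | h⟩ | ⟨c', hc', rfl⟩)
        · exact Or.inl h
        · exact Or.inr ⟨c, Or.inl rfl, h⟩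
        · exact Or.inr ⟨c', Or.inr hc', rfl⟩
      · rintro (h | ⟨c', hc' | hc', rfl⟩)
        · exact Or.inl (Or.inl h)
        · exact Or.inl (Or.inr (by rw [hc']))
        · exact Or.inr ⟨c', hc', rfl⟩

-- membership in the outer sticker-fold of A's set
theorem pv_mem_sticker_fold (stickers : List String) (s : PySem.Set String) (k : String) :
    k ∈ stickers.foldl
        (fun s sticker => sticker.toList.foldl (fun s c => PySem.Set.add s (String.mk [c])) s) s ↔
      k ∈ s ∨ ∃ st ∈ stickers, ∃ c ∈ st.toList, k = String.mk [c] := by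
  induction stickers generalizing s with
  | nil => simp
  | cons st rest ih =>
      simp only [List.foldl_cons, ih, pv_mem_char_fold, List.mem_cons]
      constructor
      · rintro (⟨h | h⟩ | ⟨st', h1, h2⟩)
        · exact Or.inl h
        · exact Or.inr ⟨st, Or.inl rfl, h⟩
        · exact Or.inr ⟨st', Or.inr h1, h2⟩
      · rintro (h | ⟨st', hst' | hst', h2⟩)
        · exact Or.inl (Or.inl h)
        · exact Or.inl (Or.inr (by rw [hst'] at h2; exact h2))
        · exact Or.inr ⟨st', hst', h2⟩

-- A's set membership coincides with B's "found" predicate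
theorem pv_contains_iff_found (stickers : List String) (k : String) :
    PySem.Set.contains
      (stickers.foldl
        (fun s sticker => sticker.toList.foldl (fun s c => PySem.Set.add s (String.mk [c])) s)
        PySem.Set.empty) k = pvFound stickers k := by
  rcases Bool.eq_false_or_eq_true (pvFound stickers k) with h | h <;> rw [h]
  · rw [PySem.Set.contains_iff, pv_mem_sticker_fold]
    simp only [pvFound, List.any_eq_true, beq_iff_eq] at h
    obtain ⟨st, hst, c, hc, hk⟩ := h
    exact Or.inr ⟨st, hst, c, hc, hk⟩
  · rw [Bool.eq_false_iff]
    intro hc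
    rw [PySem.Set.contains_iff, pv_mem_sticker_fold] at hc
    rcases hc with hc | ⟨st, hst, c, hc, hk⟩
    · simp [PySem.Set.empty] at hc
    · rw [Bool.eq_false_iff] at h
      apply h
      simp only [pvFound, List.any_eq_true, beq_iff_eq]
      exact ⟨st, hst, c, hc, hk⟩

-- B's "worklist emptied" is A's "every key passes the membership test"
theorem pv_all_eq_isEmpty (f : String → Bool) (l : List (String × Int)) :
    l.all (fun kv => f kv.1)
      = ((PySem.Set.ofList (l.map Prod.fst)).filter (fun k => !(f k))).isEmpty := by
  rw [Bool.eq_iff_iff]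
  simp only [List.all_eq_true, List.isEmpty_iff, List.filter_eq_nil_iff,
    Bool.not_eq_eq_eq_not, Bool.not_true]
  constructor
  · rintro h k hk hf
    rw [PySem.Set.mem_ofList] at hk
    obtain ⟨kv, hkv, rfl⟩ := List.mem_map.mp hk
    rw [h kv hkv] at hf
    cases hf
  · intro h kv hkv
    rcases Bool.eq_false_or_eq_true (f kv.1) with hf | hf
    · exact hf
    · exact absurd hf (h kv.1 ((PySem.Set.mem_ofList _ _).mpr (List.mem_map.mpr ⟨kv, hkv, rfl⟩)))

-- the early-return key scan is List.all of the membership test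
theorem pv_checkKeys_eq_all (s : PySem.Set String) (l : List (String × Int)) :
    pvCheckKeys s l = l.all (fun kv => PySem.Set.contains s kv.1) := by
  induction l with
  | nil => rfl
  | cons kv rest ih =>
      obtain ⟨k, v⟩ := kv
      simp only [pvCheckKeys, List.all_cons, ih]
      by_cases h : PySem.Set.contains s k
      · simp_all
      · simp_all

-- ===== VERDICT (by name: the statement is the Claim_ definition above) =====
theorem it_is_possible_task_spec : Claim_equal_it_is_possible_task := by
  intro dlm stickers _
  unfold Spec_it_is_possible_task it_is_possible_task it_is_possible_task_alt
  rw [pv_checkKeys_eq_all, pv_drain_eq]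
  simp only [pv_contains_iff_found]
  exact pv_all_eq_isEmpty (pvFound stickers) dlm
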